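-- pv_equiv track=rewrite | github.com/leaty-ell/practicum-16 | tsk2.py | common_courses
-- ===== SOURCE A (Python) =====
-- def common_courses(students_courses) -> int:
--     """
--     Determines how many courses all students have chosen.
--
--     Args:
--         students_courses (list): List of lists, containing courses for one student
--
--     Returns:
--         int: Number of courses chosen by all students
--     """
--     if not students_courses:
--         return 0
--
--     sets = []
--     for courses in students_courses:
--         sets.append(set(courses))
--
--     common = sets[0]
--     for s in sets[1:]:
--         common = common.intersection(s)
--     return len(common)
-- ===== SOURCE B (Python) =====
-- def common_courses(students_courses) -> int:
--     """Counts courses chosen by all students via a frequency table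
--     instead of a shrinking intersection set."""
--     if not students_courses:
--         return 0
--     counts = {}
--     for courses in students_courses:
--         for c in dict.fromkeys(courses):
--             counts[c] = counts.get(c, 0) + 1
--     n = len(students_courses)
--     return sum(1 for v in counts.values() if v == n)
-- ===== Notes on version B (the rewrite author's own statement) =====
-- stated objective: alternative
-- what changed: replaces the shrinking set-intersection fold with a single frequency table (per-student deduped counts), returning the number of courses whose count equals the number of students
import Mathlib
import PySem

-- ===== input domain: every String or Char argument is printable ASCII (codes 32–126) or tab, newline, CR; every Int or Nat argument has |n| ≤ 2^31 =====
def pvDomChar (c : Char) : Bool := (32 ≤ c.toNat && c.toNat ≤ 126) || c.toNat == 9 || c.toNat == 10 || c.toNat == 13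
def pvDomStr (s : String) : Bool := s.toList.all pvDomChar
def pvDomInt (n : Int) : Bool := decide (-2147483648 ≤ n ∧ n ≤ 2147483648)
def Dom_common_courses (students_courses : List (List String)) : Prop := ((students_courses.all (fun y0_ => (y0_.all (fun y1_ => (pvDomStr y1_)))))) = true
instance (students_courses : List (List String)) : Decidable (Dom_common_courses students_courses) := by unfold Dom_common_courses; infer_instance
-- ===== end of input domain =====

-- B replaces A's shrinking set-intersection fold with a frequency table (counts per deduped student),
-- returning how many courses have count = number of students; alternative algorithm, same asymptotic cost.


-- ===== PORT A =====
def common_courses (students_courses : List (List String)) : Int :=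
  if students_courses = [] then 0
  else
    -- sets = []; for courses in students_courses: sets.append(set(courses))
    let sets := students_courses.foldl
      (fun acc courses => acc ++ [PySem.Set.ofList courses]) ([] : List (PySem.Set String))
    -- common = sets[0]; for s in sets[1:]: common = common.intersection(s)
    match sets with
    | [] => 0   -- unreachable: students_courses ≠ []
    | s0 :: rest => ((rest.foldl (fun c s => PySem.Set.inter c s) s0).length : Int)

-- ===== PORT B =====
def common_courses_alt (students_courses : List (List String)) : Int :=
  if students_courses = [] then 0
  else
    -- counts = {}; for courses: for c in dict.fromkeys(courses): counts[c] = counts.get(c,0)+1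
    let counts := students_courses.foldl
      (fun d courses => (PySem.List.dedup courses).foldl
        (fun d c => PySem.Dict.modify d c 0 (fun x => x + 1)) d)
      (PySem.Dict.empty : PySem.Dict String Int)
    let n : Int := students_courses.length
    -- sum(1 for v in counts.values() if v == n)
    counts.values.foldl (fun acc v => if v = n then acc + 1 else acc) 0

-- ===== PRECONDITION & SPEC =====
def Spec_common_courses (students_courses : List (List String)) (out : Int) : Prop := out = common_courses_alt students_courses
instance (students_courses : List (List String)) (out : Int) : Decidable (Spec_common_courses students_courses out) := by unfold Spec_common_courses; infer_instance

-- ===== CLAIM (what is proved, stated in full; the proofs are below) =====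
def Claim_equal_common_courses : Prop := ∀ (students_courses : List (List String)), Dom_common_courses students_courses → Spec_common_courses students_courses (common_courses students_courses)

-- ===== LEMMAS AND PROOFS =====

-- the intersection fold keeps exactly the elements of the start set that lie in every later set
lemma foldl_inter_eq_filter {α : Type} [BEq α] [LawfulBEq α]
    (ss : List (PySem.Set α)) (c : PySem.Set α) :
    ss.foldl (fun c s => PySem.Set.inter c s) c
      = c.filter (fun x => ss.all (fun s => s.contains x)) := by
  induction ss generalizing c with
  | nil => simp
  | cons s ss ih =>
    rw [List.foldl_cons, ih]
    simp only [PySem.Set.inter, List.filter_filter, List.all_cons]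
    exact List.filter_congr (fun x _ => by rw [Bool.and_comm])

-- counting a course in the concatenation of per-student deduped lists counts the students containing it
lemma count_flatMap_dedup (l : List (List String)) (k : String) :
    (l.flatMap PySem.List.dedup).count k = l.countP (fun c => decide (k ∈ c)) := by
  induction l with
  | nil => simp
  | cons c l ih =>
    rw [List.flatMap_cons, List.count_append, ih, List.countP_cons]
    by_cases h : k ∈ c
    · rw [List.count_eq_one_of_mem (PySem.List.nodup_dedup c) ((PySem.List.mem_dedup c k).mpr h)]
      simp [h, Nat.add_comm]
    · rw [List.count_eq_zero_of_not_mem (fun hm => h ((PySem.List.mem_dedup c k).mp hm))]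
      simp [h]

-- two duplicate-free lists whose (member ∧ predicate) sets coincide have equal countP
lemma countP_eq_of_nodup {α : Type} [DecidableEq α] {xs ys : List α} {p q : α → Bool}
    (hx : xs.Nodup) (hy : ys.Nodup)
    (h : ∀ x, (x ∈ xs ∧ p x = true) ↔ (x ∈ ys ∧ q x = true)) :
    xs.countP p = ys.countP q := by
  have hfx : (xs.filter p).Nodup := List.Nodup.filter p hx
  have hfy : (ys.filter q).Nodup := List.Nodup.filter q hy
  have hset : (xs.filter p).toFinset = (ys.filter q).toFinset := by
    ext x
    simp only [List.mem_toFinset, List.mem_filter]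
    exact h x
  calc xs.countP p = (xs.filter p).length := List.countP_eq_length_filter ..
    _ = (xs.filter p).toFinset.card := (List.toFinset_card_of_nodup hfx).symm
    _ = (ys.filter q).toFinset.card := by rw [hset]
    _ = (ys.filter q).length := List.toFinset_card_of_nodup hfy
    _ = ys.countP q := (List.countP_eq_length_filter ..).symm

theorem common_courses_eq (l : List (List String)) :
    common_courses l = common_courses_alt l := by
  cases l with
  | nil => rfl
  | cons s0 rest =>
    -- reduce port A to a filter over set(s0)
    have hA : common_courses (s0 :: rest)
        = (((PySem.Set.ofList s0).filter
            (fun x => (rest.map PySem.Set.ofList).all (fun s => s.contains x))).length : Int) := by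
      simp only [common_courses, if_neg (List.cons_ne_nil s0 rest),
        PySem.List.foldl_append_singleton_eq_map, List.nil_append, List.map_cons,
        foldl_inter_eq_filter]
    -- reduce port B to a countP over set(flattened deduped lists)
    set ds := (s0 :: rest).flatMap PySem.List.dedup with hds
    have hB : common_courses_alt (s0 :: rest)
        = (((PySem.Set.ofList ds).countP
            (fun k => decide ((ds.count k : Int) = ((s0 :: rest).length : Int)))) : Int) := by
      simp only [common_courses_alt, if_neg (List.cons_ne_nil s0 rest)]
      have hc : (s0 :: rest).foldl
          (fun d courses => (PySem.List.dedup courses).foldl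
            (fun d c => PySem.Dict.modify d c 0 (fun x => x + 1)) d)
          (PySem.Dict.empty : PySem.Dict String Int)
          = PySem.Dict.counter ds := by
        simp only [PySem.Dict.counter, hds]
        rw [List.foldl_flatMap]
      rw [hc]
      have hcount := PySem.List.foldl_count_if
        (fun v : Int => decide (v = ((s0 :: rest).length : Int)))
        ((PySem.Dict.counter ds).values) 0
      simp only [decide_eq_true_eq] at hcount
      rw [hcount, Int.zero_add]
      simp only [PySem.Dict.values, PySem.Dict.items_counter, List.map_map, List.countP_map]
      rfl
    rw [hA, hB]
    congr 1
    rw [← List.countP_eq_length_filter]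
    apply countP_eq_of_nodup (PySem.Set.nodup_ofList s0) (PySem.Set.nodup_ofList ds)
    intro x
    have hcnt : ds.count x = (s0 :: rest).countP (fun c => decide (x ∈ c)) :=
      count_flatMap_dedup (s0 :: rest) x
    constructor
    · rintro ⟨hx0, hall⟩
      rw [PySem.Set.mem_ofList] at hx0
      have hmem : ∀ c ∈ (s0 :: rest), x ∈ c := by
        intro c hc
        rcases List.mem_cons.mp hc with rfl | hc
        · exact hx0
        · have := List.all_eq_true.mp hall (PySem.Set.ofList c)
            (List.mem_map.mpr ⟨c, hc, rfl⟩)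
          have hx : x ∈ PySem.Set.ofList c := by
            simpa [PySem.Set.contains] using this
          exact (PySem.Set.mem_ofList c x).mp hx
      refine ⟨?_, ?_⟩
      · rw [PySem.Set.mem_ofList, hds]
        exact List.mem_flatMap.mpr ⟨s0, List.mem_cons_self, (PySem.List.mem_dedup s0 x).mpr hx0⟩
      · have hlen : ds.count x = (s0 :: rest).length := by
          rw [hcnt]
          exact List.countP_eq_length.mpr (fun c hc => decide_eq_true (hmem c hc))
        simpa using congrArg (fun n : Nat => (n : Int)) hlen
    · rintro ⟨_, hq⟩
      have hcnt' : ds.count x = (s0 :: rest).length := by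
        have := of_decide_eq_true hq
        exact_mod_cast this
      rw [hcnt] at hcnt'
      have hall : ∀ c ∈ (s0 :: rest), x ∈ c := by
        intro c hc
        have := List.countP_eq_length.mp hcnt' c hc
        simpa using this
      refine ⟨(PySem.Set.mem_ofList s0 x).mpr (hall s0 List.mem_cons_self), ?_⟩
      apply List.all_eq_true.mpr
      rintro s hs
      rcases List.mem_map.mp hs with ⟨c, hc, rfl⟩
      have hx : x ∈ PySem.Set.ofList c :=
        (PySem.Set.mem_ofList c x).mpr (hall c (List.mem_cons_of_mem s0 hc))
      simpa [PySem.Set.contains] using hx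

-- ===== VERDICT (by name: the statement is the Claim_ definition above) =====
theorem common_courses_spec : Claim_equal_common_courses := by
  intro l _
  exact common_courses_eq l
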